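-- pv_equiv track=rewrite | github.com/jmagak/content-editorial-assistant | rules/punctuation/spacing_rule.py | _find_inline_code_regions
-- ===== SOURCE A (Python) =====
-- from typing import List, Dict, Any, Optional
--
-- def _find_inline_code_regions(text: str) -> List[tuple]:
--     """
--     Find all inline code regions (text between backticks).
--
--     Returns a list of (start, end) tuples for each inline code region.
--     These regions should be completely excluded from punctuation analysis.
--
--     Example: "The `auth.secret.ref.name` field..."
--     Returns: [(4, 25)] for the backtick-enclosed region
--     """
--     regions = []
--     in_code = False
--     start = -1
--
--     i = 0
--     while i < len(text):
--         if text[i] == '`':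
--             if not in_code:
--                 # Start of inline code
--                 start = i
--                 in_code = True
--             else:
--                 # End of inline code
--                 regions.append((start, i + 1))
--                 in_code = False
--                 start = -1
--         i += 1
--
--     return regions
-- ===== SOURCE B (Python) =====
-- def _find_inline_code_regions(text: str) -> list:
--     positions = [i for i, c in enumerate(text) if c == '`']
--     return [(s, e + 1) for s, e in zip(positions[0::2], positions[1::2])]
-- ===== Notes on version B (the rewrite author's own statement) =====
-- stated objective: simpler
-- what changed: Replaces the stateful while-loop (in_code flag, start variable) with a one-pass collection of all backtick indices followed by pairing them two at a time via zip of even/odd slices.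
import Mathlib
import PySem

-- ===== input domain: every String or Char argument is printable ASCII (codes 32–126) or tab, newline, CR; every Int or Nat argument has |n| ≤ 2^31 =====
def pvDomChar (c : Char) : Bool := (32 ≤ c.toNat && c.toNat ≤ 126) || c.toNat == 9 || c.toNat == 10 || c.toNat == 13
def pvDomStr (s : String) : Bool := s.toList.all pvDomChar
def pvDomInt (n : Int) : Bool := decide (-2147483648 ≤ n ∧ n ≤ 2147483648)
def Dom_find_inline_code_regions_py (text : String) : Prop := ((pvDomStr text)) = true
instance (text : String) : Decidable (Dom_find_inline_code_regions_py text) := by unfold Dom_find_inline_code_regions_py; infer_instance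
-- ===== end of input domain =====

-- B replaces A's stateful while-loop with: collect backtick indices, pair them two at a time.
-- ===== PORT A =====
-- literal transliteration of A's while loop: state (regions, in_code, start), index i over the chars
def pvLoopA : List Char → Int → List (Int × Int) → Bool → Int → List (Int × Int)
  | [], _, regions, _, _ => regions
  | c :: cs, i, regions, in_code, start =>
    if c = '`' then
      if !in_code then pvLoopA cs (i + 1) regions true i
      else pvLoopA cs (i + 1) (regions ++ [(start, i + 1)]) false (-1)
    else pvLoopA cs (i + 1) regions in_code start

def find_inline_code_regions_py (text : String) : List (Int × Int) :=
  pvLoopA text.toList 0 [] false (-1)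

-- ===== PORT B =====
-- positions = [i for i, c in enumerate(text) if c == '`']
def pvPositions : List Char → Int → List Int
  | [], _ => []
  | c :: cs, i => if c = '`' then i :: pvPositions cs (i + 1) else pvPositions cs (i + 1)

-- zip(positions[0::2], positions[1::2]) with (s, e+1): pair consecutive elements two at a time
def pvPairUp : List Int → List (Int × Int)
  | s :: e :: rest => (s, e + 1) :: pvPairUp rest
  | _ => []

def find_inline_code_regions_py_alt (text : String) : List (Int × Int) :=
  pvPairUp (pvPositions text.toList 0)

-- ===== PRECONDITION & SPEC =====
def Spec_find_inline_code_regions_py (text : String) (out : List (Int × Int)) : Prop := out = find_inline_code_regions_py_alt text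
instance (text : String) (out : List (Int × Int)) : Decidable (Spec_find_inline_code_regions_py text out) := by unfold Spec_find_inline_code_regions_py; infer_instance

-- ===== CLAIM (what is proved, stated in full; the proofs are below) =====
def Claim_equal_find_inline_code_regions_py : Prop := ∀ (text : String), Dom_find_inline_code_regions_py text → Spec_find_inline_code_regions_py text (find_inline_code_regions_py text)

-- ===== LEMMAS AND PROOFS =====
-- invariant of A's loop in terms of B's positions/pairing, for both values of in_code
theorem pvLoopA_eq (cs : List Char) : ∀ (i : Int) (regions : List (Int × Int)) (start : Int),
    pvLoopA cs i regions false start = regions ++ pvPairUp (pvPositions cs i) ∧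
    pvLoopA cs i regions true start =
      regions ++ (match pvPositions cs i with
                  | [] => []
                  | e :: rest => (start, e + 1) :: pvPairUp rest) := by
  induction cs with
  | nil => intro i regions start; simp [pvLoopA, pvPositions, pvPairUp]
  | cons c cs ih =>
    intro i regions start
    by_cases h : c = '`'
    · constructor
      · simp only [pvLoopA, pvPositions, h]
        rw [(ih (i+1) regions i).2]; simp only [if_true]
        cases hp : pvPositions cs (i+1) <;> simp [pvPairUp]
      · simp only [pvLoopA, pvPositions, h]
        rw [(ih (i+1) (regions ++ [(start, i+1)]) (-1)).1]
        cases hp : pvPositions cs (i+1) <;> simp [pvPairUp]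
    · constructor
      · simp only [pvLoopA, pvPositions, if_neg h]
        exact (ih (i+1) regions start).1
      · simp only [pvLoopA, pvPositions, if_neg h]
        exact (ih (i+1) regions start).2

-- ===== VERDICT (by name: the statement is the Claim_ definition above) =====
theorem find_inline_code_regions_py_spec : Claim_equal_find_inline_code_regions_py := by
  intro text _
  unfold Spec_find_inline_code_regions_py find_inline_code_regions_py find_inline_code_regions_py_alt
  rw [(pvLoopA_eq text.toList 0 [] (-1)).1]
  simp
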